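-- pv_equiv track=rewrite | github.com/SertacCebeci/vault | scripts/phase5b_hot_leads.py | insert_lead
-- ===== SOURCE A (Python) =====
-- def insert_lead(text: str, lead: str) -> str | None:
--     """
--     Insert `## Lead\\n\\n{lead}\\n\\n` between the title heading (`# Title`)
--     and the first `## Section` heading. Returns the new text, or None if a
--     `## Lead` section is already present.
--     """
--     if "## Lead" in text:
--         return None
--     lines = text.split("\n")
--     out: list[str] = []
--     inserted = False
--     for line in lines:
--         if not inserted and line.startswith("## ") and not line.startswith("## Lead"):
--             out.append("## Lead")
--             out.append("")
--             out.append(lead)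
--             out.append("")
--             inserted = True
--         out.append(line)
--     if not inserted:
--         return None
--     return "\n".join(out)
-- ===== SOURCE B (Python) =====
-- def insert_lead(text: str, lead: str) -> str | None:
--     if "## Lead" in text:
--         return None
--     lines = text.split("\n")
--     i = next((k for k, ln in enumerate(lines)
--               if ln.startswith("## ") and not ln.startswith("## Lead")), None)
--     if i is None:
--         return None
--     return "\n".join(lines[:i] + ["## Lead", "", lead, ""] + lines[i:])
-- ===== Notes on version B (the rewrite author's own statement) =====
-- stated objective: simpler
-- what changed: Replaces the flag-driven one-pass accumulator with a find-insertion-index-then-splice decomposition: locate the first section heading with next(enumerate(...)) and join lines[:i] + lead block + lines[i:].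
import Mathlib
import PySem

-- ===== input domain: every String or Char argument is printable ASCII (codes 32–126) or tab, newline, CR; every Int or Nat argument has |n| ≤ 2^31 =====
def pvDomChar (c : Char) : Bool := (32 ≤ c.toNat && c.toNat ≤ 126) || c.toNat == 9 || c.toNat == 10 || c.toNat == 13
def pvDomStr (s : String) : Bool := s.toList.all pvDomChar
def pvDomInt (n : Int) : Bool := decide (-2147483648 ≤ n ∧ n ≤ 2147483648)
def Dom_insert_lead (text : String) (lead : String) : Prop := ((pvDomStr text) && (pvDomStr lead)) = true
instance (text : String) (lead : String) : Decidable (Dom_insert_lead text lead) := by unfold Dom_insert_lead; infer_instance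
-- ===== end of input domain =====

-- B replaces A's flag-driven single-pass accumulator with a find-insertion-index-then-splice
-- decomposition (simpler); both are proved to return the same Option String on the stated domain.


-- ===== PORT A =====
-- the loop's insertion condition (shared by both Pythons verbatim)
def pvHit (line : String) : Bool :=
  PySem.Str.startswith line "## " && !PySem.Str.startswith line "## Lead"

-- one iteration of A's for-loop over state (out, inserted)
def pvStep (lead : String) (s : List String × Bool) (line : String) : List String × Bool :=
  if !s.2 && pvHit line then (s.1 ++ ["## Lead", "", lead, "", line], true)
  else (s.1 ++ [line], s.2)

def insert_lead (text : String) (lead : String) : Option String :=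
  if PySem.Str.isIn "## Lead" text then none
  else
    let lines := (PySem.Str.split? text "\n").getD []
    let r := lines.foldl (pvStep lead) ([], false)
    if !r.2 then none
    else some (PySem.Str.join "\n" r.1)

-- ===== PORT B =====
def insert_lead_alt (text : String) (lead : String) : Option String :=
  if PySem.Str.isIn "## Lead" text then none
  else
    let lines := (PySem.Str.split? text "\n").getD []
    match lines.findIdx? pvHit with
    | none => none
    | some i =>
        some (PySem.Str.join "\n" (lines.take i ++ ["## Lead", "", lead, ""] ++ lines.drop i))

-- ===== PRECONDITION & SPEC =====
def Spec_insert_lead (text : String) (lead : String) (out : Option String) : Prop := out = insert_lead_alt text lead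
instance (text : String) (lead : String) (out : Option String) : Decidable (Spec_insert_lead text lead out) := by unfold Spec_insert_lead; infer_instance

-- ===== CLAIM (what is proved, stated in full; the proofs are below) =====
def Claim_equal_insert_lead : Prop := ∀ (text : String) (lead : String), Dom_insert_lead text lead → Spec_insert_lead text lead (insert_lead text lead)

-- ===== LEMMAS AND PROOFS =====

theorem pv_step_true (lead l : String) (acc : List String) :
    pvStep lead (acc, true) l = (acc ++ [l], true) := by
  simp [pvStep]

theorem pv_step_nohit (lead l : String) (acc : List String) (hl : pvHit l = false) :
    pvStep lead (acc, false) l = (acc ++ [l], false) := by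
  simp [pvStep, hl]

theorem pv_step_hit (lead l : String) (acc : List String) (hl : pvHit l = true) :
    pvStep lead (acc, false) l = (acc ++ ["## Lead", "", lead, "", l], true) := by
  simp [pvStep, hl]

-- once inserted, A's loop only appends the remaining lines
theorem pv_foldl_true (lead : String) (lines : List String) :
    ∀ acc : List String, lines.foldl (pvStep lead) (acc, true) = (acc ++ lines, true) := by
  induction lines with
  | nil => intro acc; simp
  | cons l ls ih =>
      intro acc
      rw [List.foldl_cons, pv_step_true, ih]
      simp

-- no hit anywhere: A's loop just copies the lines, the flag stays false
theorem pv_foldl_none (lead : String) (lines : List String)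
    (h : lines.findIdx? pvHit = none) :
    ∀ acc : List String, lines.foldl (pvStep lead) (acc, false) = (acc ++ lines, false) := by
  induction lines with
  | nil => intro acc; simp
  | cons l ls ih =>
      intro acc
      rw [List.findIdx?_cons] at h
      by_cases hl : pvHit l
      · simp [hl] at h
      · rw [Bool.not_eq_true] at hl
        simp only [hl, Bool.false_eq_true, if_false] at h
        cases hls : ls.findIdx? pvHit with
        | none =>
            rw [List.foldl_cons, pv_step_nohit lead l acc hl, ih hls]
            simp
        | some j => rw [hls] at h; simp at h

-- first hit at index i: A's loop produces exactly B's splice (with the flag set)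
theorem pv_foldl_some (lead : String) (lines : List String) :
    ∀ (i : Nat), lines.findIdx? pvHit = some i →
    ∀ acc : List String,
      lines.foldl (pvStep lead) (acc, false)
        = (acc ++ lines.take i ++ ["## Lead", "", lead, ""] ++ lines.drop i, true) := by
  induction lines with
  | nil => intro i h; simp at h
  | cons l ls ih =>
      intro i h acc
      rw [List.findIdx?_cons] at h
      by_cases hl : pvHit l
      · simp only [hl, if_true] at h
        obtain rfl : i = 0 := by simpa using h.symm
        rw [List.foldl_cons, pv_step_hit lead l acc hl, pv_foldl_true]
        simp
      · rw [Bool.not_eq_true] at hl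
        simp only [hl, Bool.false_eq_true, if_false] at h
        cases hls : ls.findIdx? pvHit with
        | none => rw [hls] at h; simp at h
        | some j =>
            rw [hls] at h
            simp only [Option.map_some] at h
            obtain rfl : i = j + 1 := by simpa using h.symm
            rw [List.foldl_cons, pv_step_nohit lead l acc hl, ih j hls]
            simp [List.take_succ_cons, List.drop_succ_cons]

theorem insert_lead_eq_alt (text lead : String) :
    insert_lead text lead = insert_lead_alt text lead := by
  unfold insert_lead insert_lead_alt
  cases hin : PySem.Str.isIn "## Lead" text with
  | true => rfl
  | false =>
    simp only [Bool.false_eq_true, if_false]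
    cases hf : ((PySem.Str.split? text "\n").getD []).findIdx? pvHit with
    | none =>
        rw [pv_foldl_none lead _ hf []]
        simp
    | some i =>
        rw [pv_foldl_some lead _ i hf []]
        simp

-- ===== VERDICT (by name: the statement is the Claim_ definition above) =====
theorem insert_lead_spec : Claim_equal_insert_lead := by
  intro text lead _
  unfold Spec_insert_lead
  exact insert_lead_eq_alt text lead
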